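-- pv_equiv track=rewrite | github.com/95J1n9u/ilgi-api | app/utils/validators.py | validate_search_query
-- ===== SOURCE A (Python) =====
-- def validate_search_query(query: str, min_length: int = 2, max_length: int = 100) -> tuple[bool, str]:
--     """검색 쿼리 검증"""
--     if not query:
--         return False, "검색어가 필요합니다"
--
--     query = query.strip()
--
--     if len(query) < min_length:
--         return False, f"검색어는 최소 {min_length}자 이상이어야 합니다"
--
--     if len(query) > max_length:
--         return False, f"검색어는 최대 {max_length}자까지 가능합니다"
--
--     # SQL 인젝션 방지를 위한 기본 검증
--     dangerous_chars = ["'", '"', ";", "--", "/*", "*/", "xp_", "sp_"]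
--     for char in dangerous_chars:
--         if char in query.lower():
--             return False, "허용되지 않는 문자가 포함되어 있습니다"
--
--     return True, query
-- ===== SOURCE B (Python) =====
-- def validate_search_query(query: str, min_length: int = 2, max_length: int = 100) -> tuple[bool, str]:
--     """검색 쿼리 검증 — single left-to-right scan instead of eight substring searches."""
--     if not query:
--         return False, "검색어가 필요합니다"
--
--     query = query.strip()
--
--     if len(query) < min_length:
--         return False, f"검색어는 최소 {min_length}자 이상이어야 합니다"
--
--     if len(query) > max_length:
--         return False, f"검색어는 최대 {max_length}자까지 가능합니다"
--
--     lowered = query.lower()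
--     for i in range(len(lowered)):
--         if (lowered[i] in "'\";"
--                 or lowered[i:i + 2] in ("--", "/*", "*/")
--                 or lowered[i:i + 3] in ("xp_", "sp_")):
--             return False, "허용되지 않는 문자가 포함되어 있습니다"
--
--     return True, query
-- ===== Notes on version B (the rewrite author's own statement) =====
-- stated objective: alternative
-- what changed: The per-token loop of eight full substring scans over the lowered query is replaced by a single left-to-right pass that checks, at each position, the one-, two- and three-character dangerous tokens starting there.
import Mathlib
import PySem

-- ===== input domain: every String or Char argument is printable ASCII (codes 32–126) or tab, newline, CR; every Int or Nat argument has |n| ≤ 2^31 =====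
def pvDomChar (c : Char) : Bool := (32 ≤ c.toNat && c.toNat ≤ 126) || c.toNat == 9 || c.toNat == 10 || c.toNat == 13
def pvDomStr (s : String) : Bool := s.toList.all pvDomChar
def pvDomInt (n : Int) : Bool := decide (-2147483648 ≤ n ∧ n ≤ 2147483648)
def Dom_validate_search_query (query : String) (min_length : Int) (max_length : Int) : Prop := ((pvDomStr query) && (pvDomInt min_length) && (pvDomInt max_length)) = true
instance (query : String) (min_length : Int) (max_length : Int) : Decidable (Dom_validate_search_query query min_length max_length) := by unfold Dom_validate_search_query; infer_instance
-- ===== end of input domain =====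

-- B replaces A's eight full substring scans with one left-to-right pass checking each position; alternative algorithm, same results.


-- ===== PORT A =====
-- for char in dangerous_chars: if char in query.lower(): return False, "허용되지 않는 문자가 포함되어 있습니다"
def aDangerLoop (q : String) : List String → Bool × String
  | [] => (true, q)
  | c :: rest =>
    if PySem.Str.isIn c (PySem.Str.lower q) then (false, "허용되지 않는 문자가 포함되어 있습니다")
    else aDangerLoop q rest

def validate_search_query (query : String) (min_length : Int) (max_length : Int) : Bool × String :=
  if query = "" then (false, "검색어가 필요합니다")
  else
    let q := PySem.Str.strip query
    if (PySem.Str.len q : Int) < min_length then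
      (false, "검색어는 최소 " ++ PySem.Int.toStr min_length ++ "자 이상이어야 합니다")
    else if (PySem.Str.len q : Int) > max_length then
      (false, "검색어는 최대 " ++ PySem.Int.toStr max_length ++ "자까지 가능합니다")
    else aDangerLoop q ["'", "\"", ";", "--", "/*", "*/", "xp_", "sp_"]

-- ===== PORT B =====
-- one pass over the lowered characters; at each position check the 1-, 2- and 3-char tokens starting there
-- (lowered[i] / lowered[i:i+2] / lowered[i:i+3] on the suffix = head / take 2 / take 3)
def scanDanger : List Char → Bool
  | [] => false
  | c :: rest =>
    if (c == '\'' || c == '"' || c == ';')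
        || ((c :: rest).take 2 == ['-', '-'] || (c :: rest).take 2 == ['/', '*'] || (c :: rest).take 2 == ['*', '/'])
        || ((c :: rest).take 3 == ['x', 'p', '_'] || (c :: rest).take 3 == ['s', 'p', '_'])
    then true
    else scanDanger rest

def validate_search_query_alt (query : String) (min_length : Int) (max_length : Int) : Bool × String :=
  if query = "" then (false, "검색어가 필요합니다")
  else
    let q := PySem.Str.strip query
    if (PySem.Str.len q : Int) < min_length then
      (false, "검색어는 최소 " ++ PySem.Int.toStr min_length ++ "자 이상이어야 합니다")
    else if (PySem.Str.len q : Int) > max_length then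
      (false, "검색어는 최대 " ++ PySem.Int.toStr max_length ++ "자까지 가능합니다")
    else if scanDanger (PySem.Str.lower q).toList then (false, "허용되지 않는 문자가 포함되어 있습니다")
    else (true, q)

-- ===== PRECONDITION & SPEC =====
def Spec_validate_search_query (query : String) (min_length : Int) (max_length : Int) (out : Bool × String) : Prop := out = validate_search_query_alt query min_length max_length
instance (query : String) (min_length : Int) (max_length : Int) (out : Bool × String) : Decidable (Spec_validate_search_query query min_length max_length out) := by unfold Spec_validate_search_query; infer_instance

-- ===== CLAIM (what is proved, stated in full; the proofs are below) =====
def Claim_equal_validate_search_query : Prop := ∀ (query : String) (min_length : Int) (max_length : Int), Dom_validate_search_query query min_length max_length → Spec_validate_search_query query min_length max_length (validate_search_query query min_length max_length)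

-- ===== LEMMAS AND PROOFS =====

lemma scanDanger_iff (cs : List Char) :
    scanDanger cs = true ↔
      (['\''] <:+: cs ∨ ['"'] <:+: cs ∨ [';'] <:+: cs ∨ ['-','-'] <:+: cs ∨
       ['/','*'] <:+: cs ∨ ['*','/'] <:+: cs ∨ ['x','p','_'] <:+: cs ∨ ['s','p','_'] <:+: cs) := by
  induction cs with
  | nil => simp [scanDanger]
  | cons c rest ih =>
    simp only [scanDanger]
    split_ifs with h
    · refine iff_of_true rfl ?_
      simp only [Bool.or_eq_true] at h
      rcases h with (((h | h) | h) | (h | h) | h) | (h | h)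
      · exact Or.inl (List.IsPrefix.isInfix ⟨rest, by rw [eq_of_beq h]; rfl⟩)
      · exact Or.inr (Or.inl (List.IsPrefix.isInfix ⟨rest, by rw [eq_of_beq h]; rfl⟩))
      · exact Or.inr (Or.inr (Or.inl (List.IsPrefix.isInfix ⟨rest, by rw [eq_of_beq h]; rfl⟩)))
      · exact Or.inr (Or.inr (Or.inr (Or.inl
          (List.IsPrefix.isInfix (List.prefix_iff_eq_take.mpr (by simpa using (eq_of_beq h).symm))))))
      · exact Or.inr (Or.inr (Or.inr (Or.inr (Or.inl
          (List.IsPrefix.isInfix (List.prefix_iff_eq_take.mpr (by simpa using (eq_of_beq h).symm)))))))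
      · exact Or.inr (Or.inr (Or.inr (Or.inr (Or.inr (Or.inl
          (List.IsPrefix.isInfix (List.prefix_iff_eq_take.mpr (by simpa using (eq_of_beq h).symm))))))))
      · exact Or.inr (Or.inr (Or.inr (Or.inr (Or.inr (Or.inr (Or.inl
          (List.IsPrefix.isInfix (List.prefix_iff_eq_take.mpr (by simpa using (eq_of_beq h).symm)))))))))
      · exact Or.inr (Or.inr (Or.inr (Or.inr (Or.inr (Or.inr (Or.inr
          (List.IsPrefix.isInfix (List.prefix_iff_eq_take.mpr (by simpa using (eq_of_beq h).symm)))))))))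
    · simp only [Bool.or_eq_true, not_or] at h
      obtain ⟨⟨⟨⟨h1, h2⟩, h3⟩, ⟨h4, h5⟩, h6⟩, h7, h8⟩ := h
      rw [ih]
      constructor
      · rintro (h | h | h | h | h | h | h | h)
        · exact Or.inl (List.infix_cons h)
        · exact Or.inr (Or.inl (List.infix_cons h))
        · exact Or.inr (Or.inr (Or.inl (List.infix_cons h)))
        · exact Or.inr (Or.inr (Or.inr (Or.inl (List.infix_cons h))))
        · exact Or.inr (Or.inr (Or.inr (Or.inr (Or.inl (List.infix_cons h)))))
        · exact Or.inr (Or.inr (Or.inr (Or.inr (Or.inr (Or.inl (List.infix_cons h))))))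
        · exact Or.inr (Or.inr (Or.inr (Or.inr (Or.inr (Or.inr (Or.inl (List.infix_cons h)))))))
        · exact Or.inr (Or.inr (Or.inr (Or.inr (Or.inr (Or.inr (Or.inr (List.infix_cons h)))))))
      · rintro (h | h | h | h | h | h | h | h) <;> rw [List.infix_cons_iff] at h <;>
          rcases h with h | h
        · have hc : '\'' = c := by simpa [List.cons_prefix_cons] using h
          exact absurd (beq_of_eq hc.symm) h1
        · exact Or.inl h
        · have hc : '"' = c := by simpa [List.cons_prefix_cons] using h
          exact absurd (beq_of_eq hc.symm) h2
        · exact Or.inr (Or.inl h)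
        · have hc : ';' = c := by simpa [List.cons_prefix_cons] using h
          exact absurd (beq_of_eq hc.symm) h3
        · exact Or.inr (Or.inr (Or.inl h))
        · exact absurd (beq_of_eq (by simpa using (List.prefix_iff_eq_take.mp h).symm)) h4
        · exact Or.inr (Or.inr (Or.inr (Or.inl h)))
        · exact absurd (beq_of_eq (by simpa using (List.prefix_iff_eq_take.mp h).symm)) h5
        · exact Or.inr (Or.inr (Or.inr (Or.inr (Or.inl h))))
        · exact absurd (beq_of_eq (by simpa using (List.prefix_iff_eq_take.mp h).symm)) h6
        · exact Or.inr (Or.inr (Or.inr (Or.inr (Or.inr (Or.inl h)))))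
        · exact absurd (beq_of_eq (by simpa using (List.prefix_iff_eq_take.mp h).symm)) h7
        · exact Or.inr (Or.inr (Or.inr (Or.inr (Or.inr (Or.inr (Or.inl h))))))
        · exact absurd (beq_of_eq (by simpa using (List.prefix_iff_eq_take.mp h).symm)) h8
        · exact Or.inr (Or.inr (Or.inr (Or.inr (Or.inr (Or.inr (Or.inr h))))))

lemma aDangerLoop_eq_scan (q : String) :
    aDangerLoop q ["'", "\"", ";", "--", "/*", "*/", "xp_", "sp_"] =
      (if scanDanger (PySem.Str.lower q).toList then (false, "허용되지 않는 문자가 포함되어 있습니다")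
       else (true, q)) := by
  have t1 : ("'" : String).toList = ['\''] := rfl
  have t2 : ("\"" : String).toList = ['"'] := rfl
  have t3 : (";" : String).toList = [';'] := rfl
  have t4 : ("--" : String).toList = ['-','-'] := rfl
  have t5 : ("/*" : String).toList = ['/','*'] := rfl
  have t6 : ("*/" : String).toList = ['*','/'] := rfl
  have t7 : ("xp_" : String).toList = ['x','p','_'] := rfl
  have t8 : ("sp_" : String).toList = ['s','p','_'] := rfl
  by_cases h : scanDanger (PySem.Str.lower q).toList = true
  · rw [if_pos h]
    rw [scanDanger_iff] at h
    simp only [aDangerLoop, PySem.Str.isIn_eq]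
    split_ifs with g1 g2 g3 g4 g5 g6 g7 g8 <;> try rfl
    exfalso
    simp only [t1, t2, t3, t4, t5, t6, t7, t8, PySem.Chars.isIn_iff_infix] at g1 g2 g3 g4 g5 g6 g7 g8
    tauto
  · rw [if_neg h]
    rw [scanDanger_iff] at h
    push Not at h
    obtain ⟨h1, h2, h3, h4, h5, h6, h7, h8⟩ := h
    have e1 : PySem.Chars.isIn ("'" : String).toList (PySem.Str.lower q).toList = false := by
      rw [PySem.Chars.isIn_eq_false_iff, t1]; exact h1
    have e2 : PySem.Chars.isIn ("\"" : String).toList (PySem.Str.lower q).toList = false := by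
      rw [PySem.Chars.isIn_eq_false_iff, t2]; exact h2
    have e3 : PySem.Chars.isIn (";" : String).toList (PySem.Str.lower q).toList = false := by
      rw [PySem.Chars.isIn_eq_false_iff, t3]; exact h3
    have e4 : PySem.Chars.isIn ("--" : String).toList (PySem.Str.lower q).toList = false := by
      rw [PySem.Chars.isIn_eq_false_iff, t4]; exact h4
    have e5 : PySem.Chars.isIn ("/*" : String).toList (PySem.Str.lower q).toList = false := by
      rw [PySem.Chars.isIn_eq_false_iff, t5]; exact h5
    have e6 : PySem.Chars.isIn ("*/" : String).toList (PySem.Str.lower q).toList = false := by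
      rw [PySem.Chars.isIn_eq_false_iff, t6]; exact h6
    have e7 : PySem.Chars.isIn ("xp_" : String).toList (PySem.Str.lower q).toList = false := by
      rw [PySem.Chars.isIn_eq_false_iff, t7]; exact h7
    have e8 : PySem.Chars.isIn ("sp_" : String).toList (PySem.Str.lower q).toList = false := by
      rw [PySem.Chars.isIn_eq_false_iff, t8]; exact h8
    simp only [aDangerLoop, PySem.Str.isIn_eq, e1, e2, e3, e4, e5, e6, e7, e8,
      Bool.false_eq_true, if_false]

-- ===== VERDICT (by name: the statement is the Claim_ definition above) =====
theorem validate_search_query_spec : Claim_equal_validate_search_query := by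
  intro query min_length max_length _hdom
  unfold Spec_validate_search_query validate_search_query validate_search_query_alt
  simp only [aDangerLoop_eq_scan]
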